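-- pv_equiv track=rewrite | github.com/Sudo-Swapnil/text_generator | stage3/text_generator.py | generate_head_tail_freq_dict
-- ===== SOURCE A (Python) =====
-- from collections import Counter
--
-- def generate_head_tail_freq_dict(trigrams):
--     head_tails_dict = {}
--     head_tails_freq_dict = {}
--     for head1, head2, tail in trigrams:
--         head = head1 + " " + head2
--         head_tails_dict.setdefault(head, []).append(tail)
--     for head, tails_list in head_tails_dict.items():
--         head_tails_freq_dict[head] = dict(Counter(tails_list).most_common())
--     return head_tails_freq_dict
-- ===== SOURCE B (Python) =====
-- from collections import Counter
--
-- def generate_head_tail_freq_dict(trigrams):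
--     # One flat Counter over (head, tail) pairs and ONE global stable descending
--     # sort (most_common); each ((head, tail), freq) is then scattered into its
--     # head's dict, whose slot was pre-seeded in first-appearance order.
--     flat = Counter((h1 + " " + h2, t) for h1, h2, t in trigrams)
--     result = {h1 + " " + h2: {} for h1, h2, _ in trigrams}
--     for (head, tail), freq in flat.most_common():
--         result[head][tail] = freq
--     return result
-- ===== Notes on version B (the rewrite author's own statement) =====
-- stated objective: alternative
-- what changed: Instead of A's grouping every tail into a per-head list and running a separate Counter(...).most_common() sort per head, B builds ONE flat Counter over (head, tail) pairs, performs ONE global stable descending sort (most_common) of the flat counts, and scatters each ((head, tail), freq) into its head's pre-seeded dict; stability of the global sort makes each head's tails come out in exactly A's per-head order.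
import Mathlib
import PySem

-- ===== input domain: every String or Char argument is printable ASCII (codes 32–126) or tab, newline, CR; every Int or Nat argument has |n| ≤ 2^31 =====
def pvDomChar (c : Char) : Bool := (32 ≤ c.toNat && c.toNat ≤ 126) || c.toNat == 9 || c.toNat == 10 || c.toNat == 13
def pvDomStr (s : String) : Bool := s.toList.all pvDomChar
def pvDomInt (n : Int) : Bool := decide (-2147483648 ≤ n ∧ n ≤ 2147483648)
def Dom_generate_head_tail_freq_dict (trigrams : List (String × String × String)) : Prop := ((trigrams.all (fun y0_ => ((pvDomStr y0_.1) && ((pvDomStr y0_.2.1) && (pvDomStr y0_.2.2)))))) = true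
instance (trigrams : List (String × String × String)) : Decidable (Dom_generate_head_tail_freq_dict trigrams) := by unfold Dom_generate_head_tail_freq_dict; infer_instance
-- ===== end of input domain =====

-- B replaces A's per-head grouping + per-head Counter(...).most_common() by ONE flat
-- Counter over (head, tail) pairs and ONE global stable descending sort scattered back
-- into per-head dicts (objective: alternative decomposition, same result and order).

-- ===== PORT A =====
-- setdefault(head, []).append(tail) is d.modify head [] (· ++ [tail]);
-- Counter(xs).most_common() is CPython's sorted(counter-items, key=itemgetter(1), reverse=True),
-- i.e. PySem.List.sorted (counter xs).items (·.2) true (stable descending);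
-- dict(pairs-with-distinct-keys) keeps the pairs in order, and assigning into the fresh
-- head_tails_freq_dict is a fold of inserts whose items we return.
def generate_head_tail_freq_dict (trigrams : List (String × String × String)) : List (String × List (String × Int)) :=
  let head_tails_dict : PySem.Dict String (List String) :=
    trigrams.foldl (fun d t => d.modify (t.1 ++ " " ++ t.2.1) [] (fun ys => ys ++ [t.2.2])) PySem.Dict.empty
  let head_tails_freq_dict : PySem.Dict String (List (String × Int)) :=
    head_tails_dict.items.foldl
      (fun d p => d.insert p.1 (PySem.List.sorted (PySem.Dict.counter p.2).items (fun q => q.2) true))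
      PySem.Dict.empty
  head_tails_freq_dict.items

-- ===== PORT B =====
-- flat = Counter((h1+" "+h2, t) …) is PySem.Dict.counter of the mapped pair list;
-- the dict comprehension {head: {} …} is a fold of inserts (overwrite keeps position);
-- flat.most_common() is the one global stable descending sort;
-- result[head][tail] = freq is an insert into the head's inner dict — head is always
-- pre-seeded (every head of flat comes from trigrams), so the KeyError branch is
-- unreachable and getD with an empty default computes the same lookup.
def generate_head_tail_freq_dict_alt (trigrams : List (String × String × String)) : List (String × List (String × Int)) :=
  let flat : PySem.Dict (String × String) Int :=
    PySem.Dict.counter (trigrams.map (fun t => (t.1 ++ " " ++ t.2.1, t.2.2)))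
  let result0 : PySem.Dict String (PySem.Dict String Int) :=
    trigrams.foldl (fun r t => r.insert (t.1 ++ " " ++ t.2.1) PySem.Dict.empty) PySem.Dict.empty
  let result : PySem.Dict String (PySem.Dict String Int) :=
    (PySem.List.sorted flat.items (fun q => q.2) true).foldl
      (fun r q => r.insert q.1.1 ((r.getD q.1.1 PySem.Dict.empty).insert q.1.2 q.2)) result0
  result.items.map (fun p => (p.1, p.2.items))

-- ===== PRECONDITION & SPEC =====
def Spec_generate_head_tail_freq_dict (trigrams : List (String × String × String)) (out : List (String × List (String × Int))) : Prop := out = generate_head_tail_freq_dict_alt trigrams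
instance (trigrams : List (String × String × String)) (out : List (String × List (String × Int))) : Decidable (Spec_generate_head_tail_freq_dict trigrams out) := by unfold Spec_generate_head_tail_freq_dict; infer_instance

-- ===== CLAIM (what is proved, stated in full; the proofs are below) =====
def Claim_equal_generate_head_tail_freq_dict : Prop := ∀ (trigrams : List (String × String × String)), Dom_generate_head_tail_freq_dict trigrams → Spec_generate_head_tail_freq_dict trigrams (generate_head_tail_freq_dict trigrams)

-- ===== LEMMAS AND PROOFS =====

-- proof-local abbreviations: the (head, tail) pair list and per-head tail list
def pvPairs (trigrams : List (String × String × String)) : List (String × String) :=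
  trigrams.map (fun t => (t.1 ++ " " ++ t.2.1, t.2.2))

def pvTails (pr : List (String × String)) (h : String) : List String :=
  (pr.filter (fun k => k.1 == h)).map (fun k => k.2)

-- ---- stable insertion sort: filter and key-preserving map commute with it ----

theorem pv_filter_insertBy_neg {α : Type} (bef : α → α → Bool) (p : α → Bool) (x : α)
    (l : List α) (hx : p x = false) :
    (PySem.List.insertBy bef x l).filter p = l.filter p := by
  induction l with
  | nil => simp [PySem.List.insertBy, hx]
  | cons y ys ih =>
      by_cases hb : bef x y = true
      · simp [PySem.List.insertBy, hb, hx]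
      · simp [PySem.List.insertBy, hb, List.filter_cons, ih]

theorem pv_filter_insertBy_pos {α : Type} (key : α → Int) (p : α → Bool) (x : α) (l : List α)
    (hl : l.Pairwise (fun a b => ¬ key a < key b)) (hx : p x = true) :
    (PySem.List.insertBy (fun a b => decide (key b < key a)) x l).filter p
      = PySem.List.insertBy (fun a b => decide (key b < key a)) x (l.filter p) := by
  induction l with
  | nil => simp [PySem.List.insertBy, hx]
  | cons y ys ih =>
      rcases List.pairwise_cons.mp hl with ⟨hy, hys⟩
      by_cases hb : key y < key x
      · simp only [PySem.List.insertBy, decide_eq_true_eq, if_pos hb]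
        by_cases hpy : p y = true
        · simp [hx, hpy, PySem.List.insertBy, hb]
        · simp only [List.filter_cons, hx, hpy, if_true, Bool.false_eq_true, if_false]
          cases hfy : ys.filter p with
          | nil => simp [PySem.List.insertBy]
          | cons z rest =>
              have hz : z ∈ ys := List.mem_of_mem_filter (hfy ▸ List.mem_cons_self)
              have hlt : key z < key x := lt_of_le_of_lt (not_lt.mp (hy z hz)) hb
              simp [PySem.List.insertBy, hlt]
      · simp only [PySem.List.insertBy, decide_eq_true_eq, if_neg hb]
        by_cases hpy : p y = true
        · simp only [List.filter_cons, hpy, if_true]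
          simp only [PySem.List.insertBy, decide_eq_true_eq, if_neg hb]
          rw [ih hys]
        · simp only [List.filter_cons, hpy, Bool.false_eq_true, if_false]
          rw [ih hys]

theorem pv_pairwise_insertBy {α : Type} (key : α → Int) (x : α) (l : List α)
    (hl : l.Pairwise (fun a b => ¬ key a < key b)) :
    (PySem.List.insertBy (fun a b => decide (key b < key a)) x l).Pairwise
      (fun a b => ¬ key a < key b) := by
  induction l with
  | nil => simp [PySem.List.insertBy]
  | cons y ys ih =>
      rcases List.pairwise_cons.mp hl with ⟨hy, hys⟩
      by_cases hb : key y < key x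
      · simp only [PySem.List.insertBy, decide_eq_true_eq, if_pos hb]
        refine List.pairwise_cons.mpr ⟨?_, hl⟩
        intro z hz
        rcases List.mem_cons.mp hz with rfl | hz
        · omega
        · have := hy z hz; omega
      · simp only [PySem.List.insertBy, decide_eq_true_eq, if_neg hb]
        refine List.pairwise_cons.mpr ⟨?_, ih hys⟩
        intro w hw
        rcases (PySem.List.mem_insertBy _ x w ys).mp hw with rfl | hw
        · exact hb
        · exact hy w hw

theorem pv_filter_foldl_insertBy {α : Type} (key : α → Int) (p : α → Bool) :
    ∀ (xs l : List α), l.Pairwise (fun a b => ¬ key a < key b) →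
    (xs.foldl (fun acc x => PySem.List.insertBy (fun a b => decide (key b < key a)) x acc) l).filter p
      = (xs.filter p).foldl (fun acc x => PySem.List.insertBy (fun a b => decide (key b < key a)) x acc)
          (l.filter p) := by
  intro xs
  induction xs with
  | nil => intro l _; rfl
  | cons x xs ih =>
      intro l hl
      simp only [List.foldl_cons, List.filter_cons]
      by_cases hx : p x = true
      · rw [ih _ (pv_pairwise_insertBy key x l hl), pv_filter_insertBy_pos key p x l hl hx]
        simp [hx]
      · rw [ih _ (pv_pairwise_insertBy key x l hl),
            pv_filter_insertBy_neg _ p x l (Bool.not_eq_true _ ▸ hx)]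
        simp [hx]

theorem pv_filter_sorted {α : Type} (key : α → Int) (p : α → Bool) (xs : List α) :
    (PySem.List.sorted xs key true).filter p = PySem.List.sorted (xs.filter p) key true := by
  rw [PySem.List.sorted_rev_eq_foldl_insertBy, PySem.List.sorted_rev_eq_foldl_insertBy]
  simpa using pv_filter_foldl_insertBy key p xs [] List.Pairwise.nil

theorem pv_map_insertBy {α β : Type} (g : α → β) (keyA : α → Int) (keyB : β → Int)
    (hk : ∀ a, keyB (g a) = keyA a) (x : α) (l : List α) :
    (PySem.List.insertBy (fun a b => decide (keyA b < keyA a)) x l).map g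
      = PySem.List.insertBy (fun a b => decide (keyB b < keyB a)) (g x) (l.map g) := by
  induction l with
  | nil => simp [PySem.List.insertBy]
  | cons y ys ih =>
      by_cases hb : keyA y < keyA x
      · simp [PySem.List.insertBy, hb, hk]
      · simp [PySem.List.insertBy, hb, hk, ih]

theorem pv_map_foldl_insertBy {α β : Type} (g : α → β) (keyA : α → Int) (keyB : β → Int)
    (hk : ∀ a, keyB (g a) = keyA a) :
    ∀ (xs l : List α),
    (xs.foldl (fun acc x => PySem.List.insertBy (fun a b => decide (keyA b < keyA a)) x acc) l).map g
      = (xs.map g).foldl (fun acc x => PySem.List.insertBy (fun a b => decide (keyB b < keyB a)) x acc)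
          (l.map g) := by
  intro xs
  induction xs with
  | nil => intro l; rfl
  | cons x xs ih =>
      intro l
      simp only [List.foldl_cons, List.map_cons]
      rw [ih, pv_map_insertBy g keyA keyB hk]

theorem pv_map_sorted {α β : Type} (g : α → β) (keyA : α → Int) (keyB : β → Int)
    (hk : ∀ a, keyB (g a) = keyA a) (xs : List α) :
    (PySem.List.sorted xs keyA true).map g = PySem.List.sorted (xs.map g) keyB true := by
  rw [PySem.List.sorted_rev_eq_foldl_insertBy, PySem.List.sorted_rev_eq_foldl_insertBy]
  simpa using pv_map_foldl_insertBy g keyA keyB hk xs []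

-- ---- ordered dedup (Set.ofList): filter and head-constant projection commute ----

theorem pv_filter_foldl_add {α : Type} [BEq α] [LawfulBEq α] (p : α → Bool) :
    ∀ (xs : List α) (s : PySem.Set α),
    (xs.foldl PySem.Set.add s).filter p = (xs.filter p).foldl PySem.Set.add (s.filter p) := by
  intro xs
  induction xs with
  | nil => intro s; rfl
  | cons x xs ih =>
      intro s
      simp only [List.foldl_cons, List.filter_cons]
      by_cases hx : p x = true
      · rw [ih]
        simp only [hx, reduceIte, List.foldl_cons]
        congr 1
        by_cases hm : x ∈ s
        · simp [PySem.Set.add, hm, hx]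
        · simp [PySem.Set.add, hm, List.filter_append, hx]
      · have hx' : p x = false := Bool.not_eq_true _ ▸ hx
        rw [ih]
        simp only [hx', Bool.false_eq_true, reduceIte]
        congr 1
        by_cases hm : x ∈ s
        · simp [PySem.Set.add, hm]
        · simp [PySem.Set.add, hm, List.filter_append, hx']

theorem pv_filter_ofList {α : Type} [BEq α] [LawfulBEq α] (p : α → Bool) (xs : List α) :
    (PySem.Set.ofList xs).filter p = PySem.Set.ofList (xs.filter p) := by
  simpa [PySem.Set.ofList, PySem.Set.empty] using pv_filter_foldl_add p xs []

theorem pv_snd_foldl_add (h : String) :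
    ∀ (xs : List (String × String)) (s : PySem.Set (String × String)),
    (∀ x ∈ xs, x.1 = h) → (∀ x ∈ s, x.1 = h) →
    (xs.foldl PySem.Set.add s).map (fun k => k.2)
      = (xs.map (fun k => k.2)).foldl PySem.Set.add (s.map (fun k => k.2)) := by
  intro xs
  induction xs with
  | nil => intro s _ _; rfl
  | cons x xs ih =>
      intro s hxs hs
      have hx1 : x.1 = h := hxs x List.mem_cons_self
      have hs' : ∀ y ∈ PySem.Set.add s x, y.1 = h := by
        intro y hy
        simp only [PySem.Set.add] at hy
        split at hy
        · exact hs y hy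
        · rcases List.mem_append.mp hy with hy | hy
          · exact hs y hy
          · rw [List.mem_singleton.mp hy]; exact hx1
      simp only [List.foldl_cons, List.map_cons]
      rw [ih (PySem.Set.add s x) (fun y hy => hxs y (List.mem_cons_of_mem _ hy)) hs']
      congr 1
      by_cases hm : x ∈ s
      · have h2 : x.2 ∈ s.map (fun k => k.2) := List.mem_map.mpr ⟨x, hm, rfl⟩
        simp [PySem.Set.add, hm, h2]
      · have h2 : x.2 ∉ s.map (fun k => k.2) := by
          intro hm2
          rcases List.mem_map.mp hm2 with ⟨y, hy, hy2⟩
          exact hm ((Prod.ext ((hs y hy).trans hx1.symm) hy2) ▸ hy)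
        simp [PySem.Set.add, hm, h2]

theorem pv_snd_ofList (h : String) (xs : List (String × String))
    (hh : ∀ x ∈ xs, x.1 = h) :
    (PySem.Set.ofList xs).map (fun k => k.2) = PySem.Set.ofList (xs.map (fun k => k.2)) := by
  simpa [PySem.Set.ofList, PySem.Set.empty] using pv_snd_foldl_add h xs [] hh (by simp)

theorem pv_count_snd (pr : List (String × String)) (h t : String) :
    pr.count (h, t) = (pvTails pr h).count t := by
  induction pr with
  | nil => rfl
  | cons k pr ih =>
      simp only [pvTails] at ih ⊢
      by_cases hk : k.1 = h
      · by_cases ht : k.2 = t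
        · have : k = (h, t) := Prod.ext hk ht
          simp [this, ih]
        · have : k ≠ (h, t) := fun he => ht (by rw [he])
          simp [hk, ht, this, ih]
      · have : k ≠ (h, t) := fun he => hk (by rw [he])
        simp [hk, this, ih]

theorem pv_nodup_snd (h : String) (ks : List (String × String)) (hnd : ks.Nodup)
    (hh : ∀ k ∈ ks, k.1 = h) : (ks.map (fun k => k.2)).Nodup := by
  induction ks with
  | nil => simp
  | cons k ks ih =>
      rcases List.nodup_cons.mp hnd with ⟨hk, hnd'⟩
      refine List.nodup_cons.mpr ⟨?_, ih hnd' (fun y hy => hh y (List.mem_cons_of_mem _ hy))⟩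
      intro hm
      rcases List.mem_map.mp hm with ⟨y, hy, hy2⟩
      have : y = k := Prod.ext ((hh y (List.mem_cons_of_mem _ hy)).trans
        (hh k List.mem_cons_self).symm) hy2
      exact hk (this ▸ hy)

-- ---- the scatter loop over an existing-keys list rewrites each slot in place ----

theorem pv_scatter_items (L : List ((String × String) × Int)) :
    ∀ (r : PySem.Dict String (PySem.Dict String Int)), r.keys.Nodup →
    (∀ q ∈ L, r.contains q.1.1 = true) →
    (L.foldl (fun r q => r.insert q.1.1 ((r.getD q.1.1 PySem.Dict.empty).insert q.1.2 q.2)) r).items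
      = r.items.map (fun p => (p.1,
          (L.filter (fun q => q.1.1 == p.1)).foldl (fun d q => d.insert q.1.2 q.2) p.2)) := by
  induction L with
  | nil => intro r _ _; simp
  | cons q L ih =>
      intro r hnd hc
      have hq : r.contains q.1.1 = true := hc q List.mem_cons_self
      set v := (r.getD q.1.1 PySem.Dict.empty).insert q.1.2 q.2 with hv
      have hitems := PySem.Dict.items_insert_of_contains r v hq
      have hnd' : (r.insert q.1.1 v).keys.Nodup := by
        rw [PySem.Dict.keys_insert_of_contains r v hq]; exact hnd
      have hc' : ∀ p ∈ L, (r.insert q.1.1 v).contains p.1.1 = true := by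
        intro p hp
        rw [PySem.Dict.contains_insert]
        rw [hc p (List.mem_cons_of_mem _ hp)]
        simp
      simp only [List.foldl_cons]
      rw [ih (r.insert q.1.1 v) hnd' hc', hitems, List.map_map]
      refine List.map_congr_left (fun p hp => ?_)
      by_cases hph : p.1 = q.1.1
      · have hp2 : r.getD q.1.1 PySem.Dict.empty = p.2 := by
          rw [← hph]
          exact PySem.Dict.getD_of_mem_items r (by simpa using hp) hnd _
        simp only [Function.comp_def, hph, beq_self_eq_true, if_pos, List.filter_cons]
        rw [List.foldl_cons, hv, hp2]
      · have hbe : (p.1 == q.1.1) = false := beq_eq_false_iff_ne.mpr hph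
        have hbe' : (q.1.1 == p.1) = false := beq_eq_false_iff_ne.mpr (Ne.symm hph)
        simp only [Function.comp_def, hbe, Bool.false_eq_true, if_false, List.filter_cons,
          hbe']

theorem pv_getD_foldl_insert_const {κ ν : Type} [BEq κ] [LawfulBEq κ] [DecidableEq κ] {β : Type}
    (l : List β) (key : β → κ) (c : ν) :
    ∀ (d : PySem.Dict κ ν), (∀ k, d.getD k c = c) →
    ∀ k, (l.foldl (fun d x => d.insert (key x) c) d).getD k c = c := by
  induction l with
  | nil => intro d hd k; exact hd k
  | cons x l ih =>
      intro d hd k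
      simp only [List.foldl_cons]
      refine ih _ (fun k' => ?_) k
      rw [PySem.Dict.getD_insert]
      split
      · rfl
      · exact hd k'

-- the flat sorted (head,tail)-count list B scatters from
def pvFlatSorted (trigrams : List (String × String × String)) : List ((String × String) × Int) :=
  PySem.List.sorted (PySem.Dict.counter (pvPairs trigrams)).items (fun q => q.2) true

theorem pv_A_form (trigrams : List (String × String × String)) :
    generate_head_tail_freq_dict trigrams
      = (PySem.Set.ofList ((pvPairs trigrams).map (fun k => k.1))).map
          (fun h => (h, PySem.List.sorted
            (PySem.Dict.counter (pvTails (pvPairs trigrams) h)).items (fun q => q.2) true)) := by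
  unfold generate_head_tail_freq_dict
  set ht := trigrams.foldl
    (fun d t => d.modify (t.1 ++ " " ++ t.2.1) [] (fun ys => ys ++ [t.2.2]))
    (PySem.Dict.empty : PySem.Dict String (List String)) with hht
  have hkeys : ht.keys = PySem.Set.ofList ((pvPairs trigrams).map (fun k => k.1)) := by
    rw [hht, PySem.Dict.keys_foldl_modify_key trigrams (fun t => t.1 ++ " " ++ t.2.1) []
      (fun d t ys => ys ++ [t.2.2]) PySem.Dict.empty, PySem.Dict.keys_empty,
      PySem.Set.update_nil_left, pvPairs, List.map_map]
    rfl
  have hnd : ht.keys.Nodup := by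
    rw [hht]
    exact PySem.Dict.nodup_keys_foldl_modify_key trigrams (fun t => t.1 ++ " " ++ t.2.1) []
      (fun d t ys => ys ++ [t.2.2]) PySem.Dict.empty PySem.Dict.nodup_keys_empty
  have hgetD : ∀ c, ht.getD c [] = pvTails (pvPairs trigrams) c := by
    intro c
    have hfold : ht = (pvPairs trigrams).foldl
        (fun d p => d.modify p.1 [] (fun ys => ys ++ [p.2])) PySem.Dict.empty := by
      rw [hht, pvPairs, List.foldl_map]
    rw [hfold, PySem.Dict.getD_foldl_modify_append, PySem.Dict.getD_empty, List.nil_append,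
      pvTails]
  have hfresh := PySem.Dict.items_foldl_insert_fresh (d := (PySem.Dict.empty : PySem.Dict String (List (String × Int))))
    (l := ht.items) (k := fun p => p.1)
    (v := fun p => PySem.List.sorted (PySem.Dict.counter p.2).items (fun q => q.2) true)
    (fun a _ => PySem.Dict.contains_empty _) (by simpa [PySem.Dict.keys] using hnd)
  rw [hfresh]
  rw [show (PySem.Dict.empty : PySem.Dict String (List (String × Int))).items = [] from rfl,
    List.nil_append, PySem.Dict.items_eq_map_keys ht hnd [], List.map_map, hkeys]
  refine List.map_congr_left (fun h _ => ?_)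
  simp only [Function.comp_def, hgetD]

theorem pv_B_form (trigrams : List (String × String × String)) :
    generate_head_tail_freq_dict_alt trigrams
      = (PySem.Set.ofList ((pvPairs trigrams).map (fun k => k.1))).map
          (fun h => (h, (((pvFlatSorted trigrams).filter (fun q => q.1.1 == h)).foldl
              (fun d q => d.insert q.1.2 q.2) PySem.Dict.empty).items)) := by
  unfold generate_head_tail_freq_dict_alt
  set r0 := trigrams.foldl (fun r t => r.insert (t.1 ++ " " ++ t.2.1) PySem.Dict.empty)
    (PySem.Dict.empty : PySem.Dict String (PySem.Dict String Int)) with hr0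
  have hkeys : r0.keys = PySem.Set.ofList ((pvPairs trigrams).map (fun k => k.1)) := by
    rw [hr0, PySem.Dict.keys_foldl_insert_key trigrams (fun t => t.1 ++ " " ++ t.2.1)
      (fun r t => PySem.Dict.empty) PySem.Dict.empty, PySem.Dict.keys_empty,
      PySem.Set.update_nil_left, pvPairs, List.map_map]
    rfl
  have hnd : r0.keys.Nodup := by
    rw [hr0]
    exact PySem.Dict.nodup_keys_foldl_insert_key trigrams (fun t => t.1 ++ " " ++ t.2.1)
      (fun r t => PySem.Dict.empty) PySem.Dict.empty PySem.Dict.nodup_keys_empty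
  have hgetD : ∀ k, r0.getD k PySem.Dict.empty = PySem.Dict.empty := by
    rw [hr0]
    exact pv_getD_foldl_insert_const trigrams (fun t => t.1 ++ " " ++ t.2.1) PySem.Dict.empty
      PySem.Dict.empty (fun k => PySem.Dict.getD_empty _ _)
  have hc : ∀ q ∈ pvFlatSorted trigrams, r0.contains q.1.1 = true := by
    intro q hq
    have h1 : q ∈ (PySem.Dict.counter (pvPairs trigrams)).items :=
      (PySem.List.mem_sorted _ _ _ _).mp hq
    have h2 : q.1 ∈ (PySem.Dict.counter (pvPairs trigrams)).keys :=
      PySem.Dict.mem_keys_of_mem_items _ h1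
    rw [PySem.Dict.keys_counter] at h2
    have h3 : q.1 ∈ pvPairs trigrams := (PySem.Set.mem_ofList _ _).mp h2
    have h4 : q.1.1 ∈ (pvPairs trigrams).map (fun k => k.1) := List.mem_map.mpr ⟨q.1, h3, rfl⟩
    rw [PySem.Dict.contains_iff_mem_keys, hkeys]
    exact (PySem.Set.mem_ofList _ _).mpr h4
  show ((pvFlatSorted trigrams).foldl
      (fun r q => r.insert q.1.1 ((r.getD q.1.1 PySem.Dict.empty).insert q.1.2 q.2)) r0).items.map
      (fun p => (p.1, p.2.items)) = _
  rw [pv_scatter_items (pvFlatSorted trigrams) r0 hnd hc,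
    PySem.Dict.items_eq_map_keys r0 hnd PySem.Dict.empty, hkeys, List.map_map, List.map_map]
  refine List.map_congr_left (fun h _ => ?_)
  simp only [Function.comp_def, hgetD]

theorem pv_per_head (trigrams : List (String × String × String)) (h : String) :
    (((pvFlatSorted trigrams).filter (fun q => q.1.1 == h)).foldl
        (fun d q => d.insert q.1.2 q.2) PySem.Dict.empty).items
      = PySem.List.sorted (PySem.Dict.counter (pvTails (pvPairs trigrams) h)).items
          (fun q => q.2) true := by
  set pr := pvPairs trigrams with hpr
  set p : (String × String) × Int → Bool := fun q => q.1.1 == h with hp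
  set Sfp := (pvFlatSorted trigrams).filter p with hSfp
  -- every kept element's head is h
  have hall : ∀ q ∈ Sfp, q.1.1 = h := by
    intro q hq
    exact eq_of_beq (List.mem_filter.mp hq).2
  -- the kept (head, tail) keys are distinct, hence so are the tails
  have hnd1 : (Sfp.map (fun q => q.1)).Nodup := by
    have hperm : ((pvFlatSorted trigrams).map (fun q => q.1)).Nodup := by
      have := (PySem.List.sorted_perm (PySem.Dict.counter pr).items (fun q => q.2) true).map
        (fun q => q.1)
      exact this.nodup_iff.mpr (PySem.Dict.nodup_keys_counter pr)
    exact (List.Sublist.map (fun q : (String × String) × Int => q.1)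
      (List.filter_sublist (p := p))).nodup hperm
  have hnd2 : (Sfp.map (fun q => q.1.2)).Nodup := by
    have : ∀ k ∈ Sfp.map (fun q => q.1), k.1 = h := by
      intro k hk
      rcases List.mem_map.mp hk with ⟨q, hq, rfl⟩
      exact hall q hq
    have := pv_nodup_snd h (Sfp.map (fun q => q.1)) hnd1 this
    rwa [List.map_map] at this
  have hfresh := PySem.Dict.items_foldl_insert_fresh
    (d := (PySem.Dict.empty : PySem.Dict String Int)) (l := Sfp)
    (k := fun q => q.1.2) (v := fun q => q.2)
    (fun a _ => PySem.Dict.contains_empty _) hnd2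
  rw [hfresh, show (PySem.Dict.empty : PySem.Dict String Int).items = [] from rfl,
    List.nil_append]
  -- push filter and the key-preserving projection through the stable sort
  have hchain : Sfp.map (fun q => (q.1.2, q.2))
      = PySem.List.sorted
          ((((PySem.Dict.counter pr).items).filter p).map (fun q => (q.1.2, q.2)))
          (fun q => q.2) true := by
    rw [hSfp, pvFlatSorted, ← hpr, pv_filter_sorted (fun q => q.2) p]
    exact pv_map_sorted (fun q : (String × String) × Int => (q.1.2, q.2))
      (fun q : (String × String) × Int => q.2) (fun q : String × Int => q.2) (fun a => rfl) _
  rw [hchain]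
  congr 1
  -- the filtered flat counter items ARE the per-head counter items
  rw [PySem.Dict.items_counter pr, List.filter_map, PySem.Dict.items_counter]
  have hpf : (p ∘ fun k => (k, (pr.count k : Int))) = fun k => k.1 == h := rfl
  rw [hpf, pv_filter_ofList, List.map_map]
  have hall2 : ∀ k ∈ PySem.Set.ofList (pr.filter (fun k => k.1 == h)), k.1 = h := by
    intro k hk
    exact eq_of_beq (List.mem_filter.mp ((PySem.Set.mem_ofList _ _).mp hk)).2
  have hsnd : PySem.Set.ofList (pvTails pr h)
      = (PySem.Set.ofList (pr.filter (fun k => k.1 == h))).map (fun k => k.2) := by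
    rw [pv_snd_ofList h _ (fun k hk => eq_of_beq (List.mem_filter.mp hk).2), pvTails]
  rw [hsnd, List.map_map]
  refine List.map_congr_left (fun k hk => ?_)
  have hk1 : k.1 = h := hall2 k hk
  have : pr.count k = (pvTails pr h).count k.2 := by
    have : k = (h, k.2) := Prod.ext hk1 rfl
    rw [this, pv_count_snd]
  simp only [Function.comp_def, this]

-- ===== VERDICT (by name: the statement is the Claim_ definition above) =====
theorem generate_head_tail_freq_dict_spec : Claim_equal_generate_head_tail_freq_dict := by
  intro trigrams _
  unfold Spec_generate_head_tail_freq_dict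
  rw [pv_A_form, pv_B_form]
  refine List.map_congr_left (fun h _ => ?_)
  rw [pv_per_head]
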